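-- pv_equiv track=rewrite | github.com/WhiteGobo/py-rdfprogram | programloader/Program.py | __create_output_graphs
-- ===== SOURCE A (Python) =====
-- import itertools as it
--
-- def __create_output_graphs(mut_to_var, output_args, new_axioms):
--     """
--     :TODO: doesnt respect tmp_args
--     """
--     outputgraphs = []
--     basic_information = list(new_axioms)
--     for i in range(1, len(output_args)+1):
--         for tmp_args in it.combinations(output_args, i):
--             tmp_outputgraph = set()
--             outputgraphs.append(tmp_outputgraph)
--             for ax in new_axioms:
--                 if all(mut_to_var[x] for x in ax if x in mut_to_var):
--                     tmp_outputgraph.add(tuple(mut_to_var.get(x,x)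
--                                               for x in ax))
--     return tuple(outputgraphs)
-- ===== SOURCE B (Python) =====
-- def __create_output_graphs(mut_to_var, output_args, new_axioms):
--     """
--     :TODO: doesnt respect tmp_args
--     """
--     basic_information = list(new_axioms)
--     kept = [tuple(mut_to_var.get(x, x) for x in ax)
--             for ax in new_axioms
--             if all(mut_to_var[x] for x in ax if x in mut_to_var)]
--     count = (1 << len(output_args)) - 1
--     return tuple({t for t in kept} for _ in range(count))
-- ===== Notes on version B (the rewrite author's own statement) =====
-- stated objective: alternative
-- what changed: A rebuilds the identical set (re-testing every axiom) once per non-empty combination of output_args enumerated via itertools; B filters and substitutes the axioms once into a kept list, computes the slot count in closed form as 2^len(output_args)-1, and fills each slot from that list.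
import Mathlib
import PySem

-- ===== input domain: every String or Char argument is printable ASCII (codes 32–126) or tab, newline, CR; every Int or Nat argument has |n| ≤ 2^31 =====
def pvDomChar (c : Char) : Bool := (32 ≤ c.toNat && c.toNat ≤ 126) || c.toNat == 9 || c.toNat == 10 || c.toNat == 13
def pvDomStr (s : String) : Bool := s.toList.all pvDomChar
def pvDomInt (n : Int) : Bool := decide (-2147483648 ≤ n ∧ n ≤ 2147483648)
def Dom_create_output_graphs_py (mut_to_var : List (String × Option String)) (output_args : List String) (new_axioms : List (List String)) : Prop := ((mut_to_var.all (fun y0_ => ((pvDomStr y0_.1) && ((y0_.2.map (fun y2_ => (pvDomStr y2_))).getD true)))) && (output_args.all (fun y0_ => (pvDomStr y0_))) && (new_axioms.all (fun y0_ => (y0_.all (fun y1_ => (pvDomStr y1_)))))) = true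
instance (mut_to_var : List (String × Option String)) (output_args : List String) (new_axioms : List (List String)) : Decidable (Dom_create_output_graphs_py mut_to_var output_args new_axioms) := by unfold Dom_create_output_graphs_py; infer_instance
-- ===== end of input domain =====

-- ===== PORT A =====
-- B filters/substitutes the axioms once and fills the closed-form count (2^k - 1) of slots from that list, instead of re-testing every axiom per itertools combination; objective: alternative.

-- truthiness of a dict value Optional[str]: None and "" are falsy
def pvTruthy : Option String → Bool
  | some s => s != ""
  | none => false

-- all(mut_to_var[x] for x in ax if x in mut_to_var)
def pvKeep (mut_to_var : List (String × Option String)) (ax : List String) : Bool :=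
  ax.all (fun x =>
    match (PySem.Dict.mk mut_to_var).get? x with
    | some v => pvTruthy v
    | none => true)

-- mut_to_var.get(x, x); only evaluated under pvKeep, where a present value is a non-empty string
def pvSub (mut_to_var : List (String × Option String)) (x : String) : String :=
  match (PySem.Dict.mk mut_to_var).get? x with
  | some (some s) => s
  | some none => x   -- unreachable under pvKeep (value None is falsy)
  | none => x

-- it.combinations(l, k) (order of itertools; only the length matters for the claim)
def pvCombinations : List String → Nat → List (List String)
  | _, 0 => [[]]
  | [], _ + 1 => []
  | x :: xs, n + 1 => (pvCombinations xs n).map (fun c => x :: c) ++ pvCombinations xs (n + 1)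

def create_output_graphs_py (mut_to_var : List (String × Option String)) (output_args : List String) (new_axioms : List (List String)) : List (List (List String)) :=
  let outputgraphs : List (List (List String)) := []
  let _basic_information := new_axioms
  (PySem.List.pyRange 1 ((output_args.length : Int) + 1) 1).foldl (fun ogs i =>
    (pvCombinations output_args i.toNat).foldl (fun ogs _tmp_args =>
      let tmp_outputgraph : PySem.Set (List String) :=
        new_axioms.foldl (fun s ax =>
          if pvKeep mut_to_var ax then PySem.Set.add s (ax.map (pvSub mut_to_var)) else s)
          PySem.Set.empty
      ogs ++ [tmp_outputgraph]) ogs) outputgraphs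

-- ===== PORT B =====
def create_output_graphs_py_alt (mut_to_var : List (String × Option String)) (output_args : List String) (new_axioms : List (List String)) : List (List (List String)) :=
  let _basic_information := new_axioms
  let kept : List (List String) :=
    (new_axioms.filter (fun ax => pvKeep mut_to_var ax)).map (fun ax => ax.map (pvSub mut_to_var))
  List.replicate (2 ^ output_args.length - 1) (PySem.Set.ofList kept)

-- ===== PRECONDITION & SPEC =====
def Spec_create_output_graphs_py (mut_to_var : List (String × Option String)) (output_args : List String) (new_axioms : List (List String)) (out : List (List (List String))) : Prop := out = create_output_graphs_py_alt mut_to_var output_args new_axioms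
instance (mut_to_var : List (String × Option String)) (output_args : List String) (new_axioms : List (List String)) (out : List (List (List String))) : Decidable (Spec_create_output_graphs_py mut_to_var output_args new_axioms out) := by unfold Spec_create_output_graphs_py; infer_instance

-- ===== CLAIM (what is proved, stated in full; the proofs are below) =====
def Claim_equal_create_output_graphs_py : Prop := ∀ (mut_to_var : List (String × Option String)) (output_args : List String) (new_axioms : List (List String)), Dom_create_output_graphs_py mut_to_var output_args new_axioms → Spec_create_output_graphs_py mut_to_var output_args new_axioms (create_output_graphs_py mut_to_var output_args new_axioms)

-- ===== LEMMAS AND PROOFS =====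

-- ===== VERDICT (by name: the statement is the Claim_ definition above) =====
-- inner loop: each iteration appends the same set
theorem foldl_append_const {α β : Type} (b : β) (L : List α) (acc : List β) :
    L.foldl (fun ogs _ => ogs ++ [b]) acc = acc ++ List.replicate L.length b := by
  induction L generalizing acc with
  | nil => simp
  | cons x xs ih => simpa [List.replicate_succ, List.append_assoc] using ih (acc ++ [b])

-- outer loop: appending replicates accumulates a sum of lengths
theorem foldl_append_replicate {β : Type} (b : β) (f : Int → Nat) (L : List Int) (acc : List β) :
    L.foldl (fun ogs i => ogs ++ List.replicate (f i) b) acc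
      = acc ++ List.replicate ((L.map f).sum) b := by
  induction L generalizing acc with
  | nil => simp
  | cons x xs ih =>
      simp only [List.foldl_cons, ih, List.map_cons, List.sum_cons, List.replicate_add,
        List.append_assoc]

theorem pvCombinations_length (l : List String) : ∀ k, (pvCombinations l k).length = Nat.choose l.length k := by
  induction l with
  | nil => intro k; cases k <;> simp [pvCombinations]
  | cons x xs ih =>
      intro k
      cases k with
      | zero => simp [pvCombinations]
      | succ n => simp [pvCombinations, ih, Nat.choose, Nat.add_comm]

theorem sum_choose_tail (n : Nat) :
    ((List.range n).map (fun k => Nat.choose n (k + 1))).sum = 2 ^ n - 1 := by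
  have h := Nat.sum_range_choose n
  rw [Finset.sum_range_succ'] at h
  have hl : ∀ (f : Nat → Nat) (m : Nat),
      ((List.range m).map f).sum = ∑ i ∈ Finset.range m, f i := by
    intro f m
    induction m with
    | zero => simp
    | succ m ih => rw [List.range_succ, Finset.sum_range_succ]; simp [ih]
  rw [hl]
  simp only [Nat.choose_zero_right] at h
  omega

-- A's guarded insertion fold is B's filter-map-collect
theorem foldl_if_add_eq_filter_map (p : List String → Bool) (f : List String → List String)
    (na : List (List String)) : ∀ (s0 : PySem.Set (List String)),
    na.foldl (fun s ax => if p ax then PySem.Set.add s (f ax) else s) s0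
      = ((na.filter p).map f).foldl PySem.Set.add s0 := by
  induction na with
  | nil => intro s0; simp
  | cons ax na ih =>
      intro s0
      by_cases h : p ax <;> simp [h, ih]

theorem create_output_graphs_py_spec : Claim_equal_create_output_graphs_py := by
  intro mut_to_var output_args new_axioms _hdom
  unfold Spec_create_output_graphs_py create_output_graphs_py create_output_graphs_py_alt
  simp only []
  rw [show (new_axioms.foldl (fun s ax =>
      if pvKeep mut_to_var ax then PySem.Set.add s (ax.map (pvSub mut_to_var)) else s)
      PySem.Set.empty)
    = PySem.Set.ofList ((new_axioms.filter (fun ax => pvKeep mut_to_var ax)).map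
        (fun ax => ax.map (pvSub mut_to_var))) from by
    rw [foldl_if_add_eq_filter_map, PySem.Set.ofList_eq_foldl]; rfl]
  set base : PySem.Set (List String) :=
    PySem.Set.ofList ((new_axioms.filter (fun ax => pvKeep mut_to_var ax)).map
        (fun ax => ax.map (pvSub mut_to_var))) with hbase
  have hrange : PySem.List.pyRange 1 ((output_args.length : Int) + 1) 1
      = (List.range output_args.length).map (fun k : Nat => (1 : Int) + (k : Int)) := by
    have h1 : (((output_args.length : Int) + 1) - 1).toNat = output_args.length := by omega
    rw [PySem.List.pyRange_one, h1]
  rw [hrange]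
  have hinner : ∀ (ogs : List (List (List String))) (i : Int),
      (pvCombinations output_args i.toNat).foldl (fun ogs _ => ogs ++ [base]) ogs
        = ogs ++ List.replicate (Nat.choose output_args.length i.toNat) base := by
    intro ogs i
    rw [foldl_append_const, pvCombinations_length]
  calc ((List.range output_args.length).map (fun k : Nat => (1 : Int) + (k : Int))).foldl
        (fun ogs i => (pvCombinations output_args i.toNat).foldl (fun ogs _ => ogs ++ [base]) ogs) []
      = ((List.range output_args.length).map (fun k : Nat => (1 : Int) + (k : Int))).foldl
        (fun ogs i => ogs ++ List.replicate (Nat.choose output_args.length i.toNat) base) [] := by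
        apply PySem.List.foldl_congr_mem
        intro ogs i _; exact hinner ogs i
    _ = List.replicate (2 ^ output_args.length - 1) base := by
        rw [foldl_append_replicate]
        congr 1
        rw [List.map_map]
        have : ((fun i : Int => Nat.choose output_args.length i.toNat) ∘ fun k : Nat => (1 : Int) + (k : Int))
            = fun k : Nat => Nat.choose output_args.length (k + 1) := by
          funext k
          have hk : ((1 : Int) + (k : Int)).toNat = k + 1 := by omega
          simp [Function.comp, hk]
        rw [this, sum_choose_tail, List.nil_append]
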